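-- pv_equiv track=rewrite | github.com/OI-wiki/OI-wiki | scripts/fix-details.py | fix_details
-- ===== SOURCE A (Python) =====
-- from typing import Iterable
--
-- SKIP_EXTNAME = '.skipdetails'
--
-- def index_lfirst_neq(l: Iterable, value):
--     return next(idx for idx, v in enumerate(l) if v != value)
--
-- def fix_details(md_content: str):
--     # Assume that adjacent lines with identical indentation belong to the same block
--     # so blank lines should align with the indentation of the preceding line or succeding line
--     lines = md_content.splitlines()
--     result = []
--     last_indent = 0
--     for line in lines:
--         if line.strip():  # non-blank line
--             last_indent = index_lfirst_neq(line, ' ')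
--         else:
--             line = ' '*last_indent
--         result.append(line)
--     # Align the blank line with the indentation of the succeding line if the indentation of succeding line is shorter
--     lines, result = result, []
--     last_indent = 0
--     for line in reversed(lines):
--         if line.strip():  # non-blank line
--             last_indent = index_lfirst_neq(line, ' ')
--         elif len(line) > last_indent:
--             line = ' '*last_indent
--         result.append(line)
--     result = result[::-1]
--
--     # Recover lines that marked as skipping
--     lines = md_content.splitlines()
--     recover = False
--     for index, line in enumerate(lines):
--         if line.strip() == f'<!-- preprocess{SKIP_EXTNAME} on -->':
--             recover = True
--         elif line.strip() == f'<!-- preprocess{SKIP_EXTNAME} off -->':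
--             recover = False
--
--         if recover:
--             result[index] = line
--
--     return '\n'.join(result)+'\n'
-- ===== SOURCE B (Python) =====
-- SKIP_EXTNAME = '.skipdetails'
--
-- def fix_details(md_content: str):
--     # Single forward scan over maximal runs of blank lines: each run is filled
--     # with min(indent before run, indent after run) spaces in one step; the
--     # recover pass is folded into the output pass (no in-place mutation).
--     lines = md_content.splitlines()
--     n = len(lines)
--     result = []
--     i = 0
--     prev_indent = 0
--     while i < n:
--         line = lines[i]
--         if line.strip():
--             prev_indent = len(line) - len(line.lstrip(' '))
--             result.append(line)
--             i += 1
--         else: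
--             j = i
--             while j < n and not lines[j].strip():
--                 j += 1
--             next_indent = (len(lines[j]) - len(lines[j].lstrip(' '))) if j < n else 0
--             result.extend([' ' * min(prev_indent, next_indent)] * (j - i))
--             i = j
--
--     on = f'<!-- preprocess{SKIP_EXTNAME} on -->'
--     off = f'<!-- preprocess{SKIP_EXTNAME} off -->'
--     out = []
--     recover = False
--     for line, fixed in zip(lines, result):
--         s = line.strip()
--         if s == on:
--             recover = True
--         elif s == off:
--             recover = False
--         out.append(line if recover else fixed)
--     return '\n'.join(out) + '\n'
-- ===== Notes on version B (the rewrite author's own statement) =====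
-- stated objective: alternative
-- what changed: Instead of A's forward rewrite pass plus a second backward shrink pass over the rewritten list, B makes a single forward scan over maximal runs of blank lines, filling each whole run at once with min(indent of the nearest non-blank line before, after); the recover pass is folded into the output pass over zip(lines, result) instead of mutating result[index].
import Mathlib
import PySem

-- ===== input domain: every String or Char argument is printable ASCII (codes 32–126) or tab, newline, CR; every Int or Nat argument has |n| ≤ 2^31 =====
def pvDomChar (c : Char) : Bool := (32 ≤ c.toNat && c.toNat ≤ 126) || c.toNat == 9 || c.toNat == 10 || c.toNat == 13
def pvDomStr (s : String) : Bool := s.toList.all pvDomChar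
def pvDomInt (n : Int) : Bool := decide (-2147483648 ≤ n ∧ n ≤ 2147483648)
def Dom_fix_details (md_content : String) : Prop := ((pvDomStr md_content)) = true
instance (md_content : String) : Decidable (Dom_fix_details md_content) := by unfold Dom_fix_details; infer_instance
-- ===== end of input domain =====

-- B replaces A's forward-rewrite pass plus backward-shrink pass by a SINGLE forward scan over
-- maximal runs of blank lines (each run filled at once with min(indent before, indent after)),
-- and folds the recover pass into the output pass over zip(lines, result) instead of mutating
-- result[index]; objective: alternative decomposition, same behaviour.

-- shared by both Pythons: the blank test `line.strip()` (empty after stripping whitespace)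
def pvBlank (l : String) : Bool := PySem.Chars.strip l.toList == []

-- shared: a run of n spaces
def pvSp (n : Nat) : String := String.ofList (List.replicate n ' ')

-- shared: the two marker lines
def pvOnMark : List Char := "<!-- preprocess.skipdetails on -->".toList
def pvOffMark : List Char := "<!-- preprocess.skipdetails off -->".toList

-- shared tail: '\n'.join(…) + '\n'
def pvJoinNL (result : List String) : String :=
  String.ofList (PySem.Chars.join ['\n'] (result.map String.toList) ++ ['\n'])

-- ===== PORT A =====
-- index_lfirst_neq(line, ' '): first index whose char ≠ ' '; the StopIteration case (all spaces) is
-- unreachable at A's call sites (only called on lines with non-empty strip()), `getD 0` is that dead branch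
def index_lfirst_neq (cs : List Char) : Nat := (cs.findIdx? (· != ' ')).getD 0

-- A's first pass: blank lines become ' ' * (indent of the last preceding non-blank line, default 0)
def pvPass1 : List String → Nat → List String
  | [], _ => []
  | l :: ls, li =>
    if !pvBlank l then l :: pvPass1 ls (index_lfirst_neq l.toList)
    else pvSp li :: pvPass1 ls li

-- A's second pass (run over the reversed list): shrink a blank line to the succeeding indent if shorter
def pvPass2 : List String → Nat → List String
  | [], _ => []
  | l :: ls, li =>
    if !pvBlank l then l :: pvPass2 ls (index_lfirst_neq l.toList)
    else (if l.toList.length > li then pvSp li else l) :: pvPass2 ls li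

-- A's recover loop: `for index, line in enumerate(lines): … result[index] = line`
def pvRecover : List String → Nat → Bool → List String → List String
  | [], _, _, result => result
  | l :: ls, idx, rec, result =>
    let rec' := if PySem.Chars.strip l.toList == pvOnMark then true
                else if PySem.Chars.strip l.toList == pvOffMark then false
                else rec
    let result' := if rec' then result.set idx l else result
    pvRecover ls (idx + 1) rec' result'

def fix_details (md_content : String) : String :=
  let lines := PySem.Str.splitlines md_content
  let r1 := pvPass1 lines 0
  let r2 := (pvPass2 r1.reverse 0).reverse
  pvJoinNL (pvRecover lines 0 false r2)

-- ===== PORT B =====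
-- B's indent: len(line) - len(line.lstrip(' '))
def pvLead (l : String) : Nat := l.toList.length - (l.toList.dropWhile (· == ' ')).length

-- B's `next_indent = … if j < n else 0`
def pvNxt : List String → Nat
  | [] => 0
  | r :: _ => pvLead r

-- B's main while-loop: one forward scan over maximal runs of blank lines; the inner
-- `while j < n and not lines[j].strip()` is the takeWhile/dropWhile split of the blank run
def pvGroup (lines : List String) (prev : Nat) : List String :=
  match lines with
  | [] => []
  | l :: ls =>
    if h : pvBlank l then
      List.replicate ((l :: ls).takeWhile pvBlank).length
          (pvSp (min prev (pvNxt ((l :: ls).dropWhile pvBlank))))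
        ++ pvGroup ((l :: ls).dropWhile pvBlank) prev
    else l :: pvGroup ls (pvLead l)
termination_by lines.length
decreasing_by
  · simp only [List.dropWhile_cons, h, if_pos, List.length_cons]
    exact Nat.lt_succ_of_le (List.length_dropWhile_le _ _)
  · simp

-- B's output pass: `for line, fixed in zip(lines, result): … out.append(line if recover else fixed)`
def pvRecoverB : List String → List String → Bool → List String
  | [], _, _ => []
  | _ :: _, [], _ => []
  | l :: ls, f :: fs, rec =>
    let rec' := if PySem.Chars.strip l.toList == pvOnMark then true
                else if PySem.Chars.strip l.toList == pvOffMark then false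
                else rec
    (if rec' then l else f) :: pvRecoverB ls fs rec'

def fix_details_alt (md_content : String) : String :=
  let lines := PySem.Str.splitlines md_content
  let result := pvGroup lines 0
  pvJoinNL (pvRecoverB lines result false)

-- ===== PRECONDITION & SPEC =====
def Spec_fix_details (md_content : String) (out : String) : Prop := out = fix_details_alt md_content
instance (md_content : String) (out : String) : Decidable (Spec_fix_details md_content out) := by unfold Spec_fix_details; infer_instance

-- ===== CLAIM (what is proved, stated in full; the proofs are below) =====
def Claim_equal_fix_details : Prop := ∀ (md_content : String), Dom_fix_details md_content → Spec_fix_details md_content (fix_details md_content)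

-- ===== LEMMAS AND PROOFS =====

-- proof-only helpers: preceding-indent sweep, its final carry, the succeeding-indent array
def leading_spaces : List Char → Nat
  | [] => 0
  | c :: cs => if c = ' ' then leading_spaces cs + 1 else 0

def pvPre : List String → Nat → List Nat
  | [], _ => []
  | l :: ls, cur =>
    let cur' := if !pvBlank l then leading_spaces l.toList else cur
    cur' :: pvPre ls cur'

def pvCarry2 : List String → Nat → Nat
  | [], li => li
  | l :: ls, li => pvCarry2 ls (if !pvBlank l then index_lfirst_neq l.toList else li)

def pvCarryPre : List String → Nat → Nat
  | [], cur => cur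
  | l :: ls, cur => pvCarryPre ls (if !pvBlank l then leading_spaces l.toList else cur)

-- succeeding-indent array computed suffix-first: .1 = per-line succeeding indent, .2 = its head carry
def pvSuccA : List String → List Nat × Nat
  | [] => ([], 0)
  | l :: ls =>
    let p := pvSuccA ls
    let c := if pvBlank l then p.2 else leading_spaces l.toList
    (c :: p.1, c)

theorem strip_nil_iff (cs : List Char) :
    (PySem.Chars.strip cs = []) ↔ ∀ c ∈ cs, PySem.Chars.isspace c = true := by
  simp only [PySem.Chars.strip, PySem.Chars.lstrip, PySem.Chars.rstrip,
    List.reverse_eq_nil_iff, List.dropWhile_eq_nil_iff, List.mem_reverse]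
  constructor
  · intro h c hc
    have hsplit := List.takeWhile_append_dropWhile (p := PySem.Chars.isspace) (l := cs)
    rw [← hsplit] at hc
    rcases List.mem_append.1 hc with h1 | h2
    · exact List.mem_takeWhile_imp h1
    · exact h c h2
  · intro h c hc
    exact h c ((List.dropWhile_sublist _).mem hc)

theorem pvBlank_false_iff (l : String) :
    pvBlank l = false ↔ ∃ c ∈ l.toList, PySem.Chars.isspace c = false := by
  simp [pvBlank, strip_nil_iff]

theorem pvBlank_sp (n : Nat) : pvBlank (pvSp n) = true := by
  simp only [pvBlank, beq_iff_eq, strip_nil_iff, pvSp, String.toList_ofList]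
  intro c hc
  rw [List.eq_of_mem_replicate hc]
  decide

theorem sp_toList (n : Nat) : (pvSp n).toList = List.replicate n ' ' := by
  simp [pvSp]

theorem ind_eq_lead_chars : ∀ (cs : List Char), (∃ c ∈ cs, c ≠ ' ') →
    (cs.findIdx? (· != ' ')).getD 0 = leading_spaces cs := by
  intro cs
  induction cs with
  | nil => intro h; simp at h
  | cons c cs ih =>
    intro h
    by_cases hc : c = ' '
    · subst hc
      have h' : ∃ d ∈ cs, d ≠ ' ' := by
        rcases h with ⟨d, hd, hne⟩
        rcases List.mem_cons.1 hd with rfl | hd'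
        · exact absurd rfl hne
        · exact ⟨d, hd', hne⟩
      have hne : cs.findIdx? (· != ' ') ≠ none := by
        intro hnone
        rcases h' with ⟨d, hd, hne⟩
        have := List.findIdx?_eq_none_iff.1 hnone d hd
        simp [hne] at this
      rcases Option.ne_none_iff_exists'.1 hne with ⟨k, hk⟩
      have := ih h'
      rw [hk] at this
      simp [List.findIdx?_cons, hk, leading_spaces, ← this]
    · simp [List.findIdx?_cons, hc, leading_spaces]

theorem ind_eq_lead (l : String) (h : pvBlank l = false) :
    index_lfirst_neq l.toList = leading_spaces l.toList := by
  rcases (pvBlank_false_iff l).1 h with ⟨c, hc, hsp⟩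
  refine ind_eq_lead_chars _ ⟨c, hc, ?_⟩
  intro hcq
  subst hcq
  simp [PySem.Chars.isspace] at hsp

theorem lead_eq_chars : ∀ cs : List Char,
    cs.length - (cs.dropWhile (· == ' ')).length = leading_spaces cs := by
  intro cs
  induction cs with
  | nil => simp [leading_spaces]
  | cons c cs ih =>
    by_cases hc : c = ' '
    · have hle := List.length_dropWhile_le (p := (· == ' ')) (l := cs)
      simp only [List.dropWhile_cons, hc, List.length_cons, leading_spaces, ← ih]
      simp only [beq_self_eq_true, if_pos]
      omega
    · simp [hc, leading_spaces]

theorem lead_eq (l : String) : pvLead l = leading_spaces l.toList :=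
  lead_eq_chars l.toList

theorem pvPass2_append (xs ys : List String) (li : Nat) :
    pvPass2 (xs ++ ys) li = pvPass2 xs li ++ pvPass2 ys (pvCarry2 xs li) := by
  induction xs generalizing li with
  | nil => simp [pvPass2, pvCarry2]
  | cons l ls ih => by_cases h : pvBlank l <;> simp [pvPass2, pvCarry2, h, ih]

theorem pvCarry2_append (xs ys : List String) (li : Nat) :
    pvCarry2 (xs ++ ys) li = pvCarry2 ys (pvCarry2 xs li) := by
  induction xs generalizing li with
  | nil => simp [pvCarry2]
  | cons l ls ih => simp [pvCarry2, ih]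

theorem pvPre_append (xs ys : List String) (c : Nat) :
    pvPre (xs ++ ys) c = pvPre xs c ++ pvPre ys (pvCarryPre xs c) := by
  induction xs generalizing c with
  | nil => simp [pvPre, pvCarryPre]
  | cons l ls ih => by_cases h : pvBlank l <;> simp [pvPre, pvCarryPre, h, ih]

theorem pvCarryPre_append (xs ys : List String) (c : Nat) :
    pvCarryPre (xs ++ ys) c = pvCarryPre ys (pvCarryPre xs c) := by
  induction xs generalizing c with
  | nil => simp [pvCarryPre]
  | cons l ls ih => simp [pvCarryPre, ih]

theorem carry_eq (t : List String) : ∀ (a li : Nat),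
    pvCarry2 (pvPass1 t a).reverse li = pvCarryPre t.reverse li := by
  induction t with
  | nil => intro a li; simp [pvPass1, pvCarry2, pvCarryPre]
  | cons l ls ih =>
    intro a li
    by_cases h : pvBlank l
    · rw [show pvPass1 (l :: ls) a = pvSp a :: pvPass1 ls a from by simp [pvPass1, h]]
      rw [List.reverse_cons, List.reverse_cons, pvCarry2_append, pvCarryPre_append, ih]
      simp [pvCarry2, pvCarryPre, h, pvBlank_sp]
    · rw [show pvPass1 (l :: ls) a
            = l :: pvPass1 ls (index_lfirst_neq l.toList) from by simp [pvPass1, h]]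
      rw [List.reverse_cons, List.reverse_cons, pvCarry2_append, pvCarryPre_append, ih]
      simp [pvCarry2, pvCarryPre, h, ind_eq_lead l (by simp [h])]

theorem main_eq (t : List String) : ∀ (a li : Nat),
    (pvPass2 (pvPass1 t a).reverse li).reverse
      = List.zipWith (fun l ps => if pvBlank l then pvSp (min ps.1 ps.2) else l)
          t ((pvPre t a).zip ((pvPre t.reverse li).reverse)) := by
  induction t with
  | nil => intro a li; simp [pvPass1, pvPass2, pvPre]
  | cons l ls ih =>
    intro a li
    by_cases h : pvBlank l
    · rw [show pvPass1 (l :: ls) a = pvSp a :: pvPass1 ls a from by simp [pvPass1, h]]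
      rw [List.reverse_cons, pvPass2_append, List.reverse_append, carry_eq, ih a li]
      rw [show pvPre (l :: ls) a = a :: pvPre ls a from by simp [pvPre, h]]
      rw [List.reverse_cons, pvPre_append]
      rw [show ∀ c, pvPre [l] c = [c] from fun c => by simp [pvPre, h]]
      rw [show ∀ c, pvPass2 [pvSp a] c
            = [if (pvSp a).toList.length > c then pvSp c else pvSp a] from
          fun c => by simp [pvPass2, pvBlank_sp]]
      simp only [List.reverse_append, List.reverse_singleton, List.singleton_append,
        List.zip_cons_cons, List.zipWith_cons_cons, h, sp_toList,
        List.length_replicate, gt_iff_lt]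
      congr 1
      split_ifs with hac <;> (congr 1; omega)
    · rw [show pvPass1 (l :: ls) a
            = l :: pvPass1 ls (index_lfirst_neq l.toList) from by simp [pvPass1, h]]
      rw [List.reverse_cons, pvPass2_append, List.reverse_append, carry_eq,
        ih (index_lfirst_neq l.toList) li]
      rw [show pvPre (l :: ls) a = leading_spaces l.toList :: pvPre ls (leading_spaces l.toList)
            from by simp [pvPre, h]]
      rw [List.reverse_cons, pvPre_append]
      rw [show ∀ c, pvPre [l] c = [leading_spaces l.toList] from fun c => by simp [pvPre, h]]
      rw [show ∀ c, pvPass2 [l] c = [l] from fun c => by simp [pvPass2, h]]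
      rw [ind_eq_lead l (by simp [h])]
      simp only [List.reverse_append, List.reverse_singleton, List.singleton_append,
        List.zip_cons_cons, List.zipWith_cons_cons]
      simp [h]

-- (pvPre t.reverse 0).reverse is exactly the succeeding-indent array pvSuccA
theorem succ_eq : ∀ t : List String,
    pvPre t.reverse 0 = (pvSuccA t).1.reverse ∧ pvCarryPre t.reverse 0 = (pvSuccA t).2 := by
  intro t
  induction t with
  | nil => simp [pvPre, pvCarryPre, pvSuccA]
  | cons l ls ih =>
    constructor
    · rw [List.reverse_cons, pvPre_append, ih.1, ih.2]
      by_cases h : pvBlank l <;> simp [pvPre, pvSuccA, h]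
    · rw [List.reverse_cons, pvCarryPre_append, ih.2]
      by_cases h : pvBlank l <;> simp [pvCarryPre, pvSuccA, h]

theorem pvPre_length (t : List String) (c : Nat) : (pvPre t c).length = t.length := by
  induction t generalizing c with
  | nil => simp [pvPre]
  | cons l ls ih => simp [pvPre, ih]

theorem pvSuccA_length (t : List String) : (pvSuccA t).1.length = t.length := by
  induction t with
  | nil => simp [pvSuccA]
  | cons l ls ih => simp [pvSuccA, ih]

theorem pvPre_blank_run (run : List String) (hb : ∀ x ∈ run, pvBlank x = true) (c : Nat) :
    pvPre run c = List.replicate run.length c ∧ pvCarryPre run c = c := by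
  induction run with
  | nil => simp [pvPre, pvCarryPre]
  | cons l ls ih =>
    have hl := hb l (List.mem_cons_self ..)
    have ihr := ih (fun x hx => hb x (List.mem_cons_of_mem _ hx))
    simp [pvPre, pvCarryPre, hl, ihr.1, ihr.2, List.replicate_succ]

theorem pvSuccA_blank_run (run rest : List String) (hb : ∀ x ∈ run, pvBlank x = true) :
    pvSuccA (run ++ rest)
      = (List.replicate run.length (pvSuccA rest).2 ++ (pvSuccA rest).1, (pvSuccA rest).2) := by
  induction run with
  | nil => simp
  | cons l ls ih =>
    have hl := hb l (List.mem_cons_self ..)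
    have ihr := ih (fun x hx => hb x (List.mem_cons_of_mem _ hx))
    simp [pvSuccA, ihr, hl, List.replicate_succ]

theorem nxt_eq (ls2 : List String) (hhead : ∀ r rs, ls2 = r :: rs → pvBlank r = false) :
    pvNxt ls2 = (pvSuccA ls2).2 := by
  cases ls2 with
  | nil => simp [pvNxt, pvSuccA]
  | cons r rs => simp [pvNxt, pvSuccA, hhead r rs rfl, lead_eq]

theorem dropWhile_head_false {p : String → Bool} :
    ∀ (l : List String) (r : String) (rs : List String), l.dropWhile p = r :: rs → p r = false := by
  intro l
  induction l with
  | nil => intro r rs h; simp at h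
  | cons x xs ih =>
    intro r rs h
    by_cases hx : p x
    · rw [List.dropWhile_cons, if_pos hx] at h
      exact ih r rs h
    · rw [List.dropWhile_cons, if_neg hx] at h
      cases h
      exact Bool.not_eq_true _ ▸ (by simpa using hx)

theorem zipWith_blank_run (run : List String) (hb : ∀ x ∈ run, pvBlank x = true) (p c : Nat) :
    List.zipWith (fun l ps => if pvBlank l then pvSp (min ps.1 ps.2) else l)
        run (List.replicate run.length ((p, c) : Nat × Nat))
      = List.replicate run.length (pvSp (min p c)) := by
  induction run with
  | nil => simp
  | cons l ls ih =>
    have hl := hb l (List.mem_cons_self ..)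
    simp [List.replicate_succ, hl, ih (fun x hx => hb x (List.mem_cons_of_mem _ hx))]

-- B's run-based scan computes the same zipWith-min formula
theorem group_eq : ∀ (n : Nat) (t : List String) (prev : Nat), t.length ≤ n →
    pvGroup t prev
      = List.zipWith (fun l ps => if pvBlank l then pvSp (min ps.1 ps.2) else l)
          t ((pvPre t prev).zip (pvSuccA t).1) := by
  intro n
  induction n with
  | zero =>
    intro t prev ht
    have : t = [] := List.eq_nil_of_length_eq_zero (Nat.le_zero.1 ht)
    subst this
    simp [pvGroup, pvPre, pvSuccA]
  | succ n ih =>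
    intro t prev ht
    match t with
    | [] => simp [pvGroup, pvPre, pvSuccA]
    | l :: ls =>
      by_cases h : pvBlank l
      · rw [pvGroup, dif_pos h]
        have hsplit : (l :: ls).takeWhile pvBlank ++ (l :: ls).dropWhile pvBlank = l :: ls :=
          List.takeWhile_append_dropWhile
        generalize hrun : (l :: ls).takeWhile pvBlank = run at *
        generalize hrest : (l :: ls).dropWhile pvBlank = rest at *
        have hbrun : ∀ x ∈ run, pvBlank x = true := fun x hx =>
          List.mem_takeWhile_imp (hrun ▸ hx)
        have hrunlen : run.length ≥ 1 := by
          rw [← hrun, List.takeWhile_cons, if_pos h]; simp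
        have hrestlen : rest.length ≤ n := by
          have hll : run.length + rest.length = ls.length + 1 := by
            have := congrArg List.length hsplit
            simpa using this
          have hts : ls.length + 1 ≤ n + 1 := by simpa using ht
          omega
        -- the `nxt` of B equals (pvSuccA rest).2
        have hnxt : pvNxt rest = (pvSuccA rest).2 :=
          nxt_eq rest (fun r rs hr =>
            dropWhile_head_false (l :: ls) r rs (hrest.symm ▸ hr))
        rw [← hsplit, pvPre_append]
        rw [(pvPre_blank_run run hbrun prev).1, (pvPre_blank_run run hbrun prev).2]
        rw [pvSuccA_blank_run run rest hbrun]
        have hlen1 : (List.replicate run.length prev).length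
            = (List.replicate run.length (pvSuccA rest).2).length := by simp
        rw [List.zip_append hlen1]
        have hzl : ((List.replicate run.length prev).zip
            (List.replicate run.length (pvSuccA rest).2)).length = run.length := by simp
        have hlen2 : run.length
            = ((List.replicate run.length prev).zip
                (List.replicate run.length (pvSuccA rest).2)).length := hzl.symm
        rw [List.zipWith_append hlen2]
        rw [List.zip_replicate' (a := prev) (b := (pvSuccA rest).2) (n := run.length)]
        rw [zipWith_blank_run run hbrun]
        rw [ih rest prev hrestlen, hnxt]
      · rw [pvGroup, dif_neg h]
        have : ls.length ≤ n := by simp at ht; omega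
        rw [ih ls (pvLead l) this]
        simp [pvPre, pvSuccA, h, lead_eq]

-- A's index/set recover loop equals B's zip-based output pass
theorem rec_bridge : ∀ (ls res : List String) (idx : Nat) (rec : Bool),
    res.length = idx + ls.length →
    pvRecover ls idx rec res = res.take idx ++ pvRecoverB ls (res.drop idx) rec := by
  intro ls
  induction ls with
  | nil =>
    intro res idx rec hlen
    simp only [List.length_nil, Nat.add_zero] at hlen
    simp [pvRecover, pvRecoverB, List.take_of_length_le (le_of_eq hlen)]
  | cons l ls ih =>
    intro res idx rec hlen
    have hidx : idx < res.length := by simp at hlen; omega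
    rw [pvRecover]
    set rec' := if PySem.Chars.strip l.toList == pvOnMark then true
                else if PySem.Chars.strip l.toList == pvOffMark then false
                else rec with hrec'
    have hdrop : res.drop idx = res[idx] :: res.drop (idx + 1) :=
      List.drop_eq_getElem_cons hidx
    have hRHS : res.take idx ++ pvRecoverB (l :: ls) (res.drop idx) rec
        = res.take idx ++ (if rec' then l else res[idx]) :: pvRecoverB ls (res.drop (idx + 1)) rec' := by
      rw [hdrop, pvRecoverB]
    rw [hRHS]
    by_cases hr : rec' = true
    · rw [if_pos hr] at *
      have hlen' : (res.set idx l).length = (idx + 1) + ls.length := by simp at hlen ⊢; omega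
      rw [ih (res.set idx l) (idx + 1) rec' hlen']
      rw [List.drop_set_of_lt (Nat.lt_succ_self idx)]
      have htake : (res.set idx l).take (idx + 1) = res.take idx ++ [l] := by
        rw [List.set_eq_take_append_cons_drop, if_pos hidx]
        rw [List.take_append]
        simp [Nat.min_eq_left (le_of_lt hidx)]
      rw [htake, hr]
      simp
    · rw [if_neg hr] at *
      have hlen' : res.length = (idx + 1) + ls.length := by simp at hlen ⊢; omega
      have htake : res.take (idx + 1) = res.take idx ++ [res[idx]] := by
        rw [List.take_add_one, List.getElem?_eq_getElem hidx]
        simp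
      rw [ih res (idx + 1) rec' hlen', htake, List.append_assoc]
      simp [hr]

-- ===== VERDICT (by name: the statement is the Claim_ definition above) =====
theorem fix_details_spec : Claim_equal_fix_details := by
  intro md _
  unfold Spec_fix_details
  simp only [fix_details, fix_details_alt]
  generalize PySem.Str.splitlines md = lines
  have hmain := main_eq lines 0 0
  have hsucc := (succ_eq lines).1
  have hgrp := group_eq lines.length lines 0 le_rfl
  have hZ : (pvPass2 (pvPass1 lines 0).reverse 0).reverse = pvGroup lines 0 := by
    rw [hmain, hgrp, hsucc]
    simp
  rw [hZ]
  have hlen : (pvGroup lines 0).length = 0 + lines.length := by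
    rw [hgrp]
    simp [pvPre_length, pvSuccA_length]
  rw [rec_bridge lines (pvGroup lines 0) 0 false hlen]
  simp
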